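-- pv_equiv track=rewrite | github.com/mosqueteiro/AdventOfCode | day04/ceres_search.py | diagonal_traverse
-- ===== SOURCE A (Python) =====
-- from typing import Generator
--
-- def diagonal_traverse(text_lines: tuple[str, ...], positive: bool = True) -> Generator[str, None, None]:
--     M, N = len(text_lines), len(text_lines[0])
--     if positive:
--         end_r = -1
--         step = -1
--         start_desc = N - 1
--     else:
--         end_r = N
--         step = 1
--         start_desc = 0
--
--     for n in range(N):
--         diag_line = "".join(text_lines[i][j] for i, j in zip(range(M), range(n, end_r, step)))
--         # diag_line = "".join(text_lines[i][j] for i, j in zip(range(M), range(n, N, 1)))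
--         yield diag_line
--     for m in range(1, M):
--         diag_line = "".join(text_lines[i][j] for i, j in zip(range(m, M), range(start_desc, end_r, step)))
--         yield diag_line
-- ===== SOURCE B (Python) =====
-- def diagonal_traverse(text_lines, positive=True):
--     M, N = len(text_lines), len(text_lines[0])
--     buckets = {}
--     for i in range(M):
--         row = text_lines[i]
--         for j in range(N):
--             key = i + j if positive else i - j
--             buckets.setdefault(key, []).append(row[j])
--     if positive:
--         keys = list(range(0, M + N - 1))
--     else:
--         keys = list(range(0, -N, -1)) + list(range(1, M))
--     for k in keys:
--         yield "".join(buckets.get(k, []))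
-- ===== Notes on version B (the rewrite author's own statement) =====
-- stated objective: alternative
-- what changed: A builds each diagonal separately by zipping an ascending i-range with a per-diagonal (possibly descending) j-range; B makes one row-major pass over all cells, bucketing characters into a dict keyed by i+j (or i-j), then emits the buckets in A's exact key order.
import Mathlib
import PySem

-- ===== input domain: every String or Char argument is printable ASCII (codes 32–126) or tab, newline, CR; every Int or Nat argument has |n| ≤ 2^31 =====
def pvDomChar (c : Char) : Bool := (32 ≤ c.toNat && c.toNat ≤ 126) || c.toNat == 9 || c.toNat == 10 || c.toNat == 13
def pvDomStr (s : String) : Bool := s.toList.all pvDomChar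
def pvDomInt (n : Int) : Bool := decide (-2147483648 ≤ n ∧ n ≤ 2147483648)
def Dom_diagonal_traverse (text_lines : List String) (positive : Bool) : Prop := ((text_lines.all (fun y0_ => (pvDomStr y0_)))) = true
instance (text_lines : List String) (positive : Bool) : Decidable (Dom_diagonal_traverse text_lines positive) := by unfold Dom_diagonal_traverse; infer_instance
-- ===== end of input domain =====

-- B replaces A's per-diagonal zip-of-ranges scans by one row-major bucketing pass into a dict keyed
-- by i+j (resp. i-j), emitted in A's key order (objective: alternative decomposition, same O(M*N) cost).
-- Both A and B are Python generators; the equivalence is about the list of yielded strings.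

-- ===== PORT A =====
def diagonal_traverse (text_lines : List String) (positive : Bool) : List String :=
  let M : Int := PySem.List.len text_lines
  let N : Int := PySem.Str.len (PySem.List.pyGetD text_lines 0 "")
  let end_r : Int := if positive then -1 else N
  let step : Int := if positive then -1 else 1
  let start_desc : Int := if positive then N - 1 else 0
  ((PySem.List.pyRange 0 N 1).map (fun n =>
      String.ofList (((PySem.List.pyRange 0 M 1).zip (PySem.List.pyRange n end_r step)).map
        (fun p => PySem.List.pyGetD (PySem.List.pyGetD text_lines p.1 "").toList p.2 ' '))))
  ++ ((PySem.List.pyRange 1 M 1).map (fun m =>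
      String.ofList (((PySem.List.pyRange m M 1).zip (PySem.List.pyRange start_desc end_r step)).map
        (fun p => PySem.List.pyGetD (PySem.List.pyGetD text_lines p.1 "").toList p.2 ' '))))

-- ===== PORT B =====
def diagonal_traverse_alt (text_lines : List String) (positive : Bool) : List String :=
  let M : Int := PySem.List.len text_lines
  let N : Int := PySem.Str.len (PySem.List.pyGetD text_lines 0 "")
  let buckets : PySem.Dict Int (List Char) :=
    (PySem.List.pyRange 0 M 1).foldl (fun d i =>
      let row := (PySem.List.pyGetD text_lines i "").toList
      (PySem.List.pyRange 0 N 1).foldl (fun d j =>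
        d.modify (if positive then i + j else i - j) [] (fun b => b ++ [PySem.List.pyGetD row j ' '])) d)
      PySem.Dict.empty
  let keys : List Int :=
    if positive then PySem.List.pyRange 0 (M + N - 1) 1
    else PySem.List.pyRange 0 (-N) (-1) ++ PySem.List.pyRange 1 M 1
  keys.map (fun k => String.ofList (buckets.getD k []))

-- ===== PRECONDITION & SPEC =====
-- Pre_ excludes exactly the inputs where the Python A raises: the empty tuple (IndexError on
-- text_lines[0]) and ragged grids with a row shorter than the first row (IndexError on text_lines[i][j]).
def Pre_diagonal_traverse (text_lines : List String) (positive : Bool) : Prop :=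
  text_lines ≠ [] ∧ ∀ s ∈ text_lines, PySem.Str.len (text_lines.headD "") ≤ PySem.Str.len s
instance (text_lines : List String) (positive : Bool) : Decidable (Pre_diagonal_traverse text_lines positive) := by unfold Pre_diagonal_traverse; infer_instance
def pvWitness_diagonal_traverse : List String × Bool := (["abc", "def"], true)

def Spec_diagonal_traverse (text_lines : List String) (positive : Bool) (out : List String) : Prop := out = diagonal_traverse_alt text_lines positive
instance (text_lines : List String) (positive : Bool) (out : List String) : Decidable (Spec_diagonal_traverse text_lines positive out) := by unfold Spec_diagonal_traverse; infer_instance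

-- ===== CLAIM (what is proved, stated in full; the proofs are below) =====
def Claim_equal_diagonal_traverse : Prop := ∀ (text_lines : List String) (positive : Bool), Dom_diagonal_traverse text_lines positive → Pre_diagonal_traverse text_lines positive → Spec_diagonal_traverse text_lines positive (diagonal_traverse text_lines positive)

-- ===== LEMMAS AND PROOFS =====

theorem pv_zip_range_range (m n : Nat) :
    (List.range m).zip (List.range n) = (List.range (min m n)).map (fun k => (k, k)) := by
  induction m generalizing n with
  | zero => simp
  | succ m ih =>
    cases n with
    | zero => simp
    | succ n =>
      rw [List.range_succ_eq_map, List.range_succ_eq_map, Nat.succ_min_succ,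
        List.range_succ_eq_map]
      simp [List.zip_map, ih, List.map_map, Function.comp_def]

theorem pv_zip_up_down (a b c d : Int) :
    (PySem.List.pyRange a b 1).zip (PySem.List.pyRange c d (-1)) =
      (List.range (min (b - a).toNat (c - d).toNat)).map (fun (k : Nat) => (a + (k : Int), c - (k : Int))) := by
  rw [PySem.List.pyRange_one, PySem.List.pyRange_neg_one, List.zip_map, pv_zip_range_range,
    List.map_map]
  simp [Function.comp_def, Prod.map]

theorem pv_zip_up_up (a b c d : Int) :
    (PySem.List.pyRange a b 1).zip (PySem.List.pyRange c d 1) =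
      (List.range (min (b - a).toNat (d - c).toNat)).map (fun (k : Nat) => (a + (k : Int), c + (k : Int))) := by
  rw [PySem.List.pyRange_one, PySem.List.pyRange_one, List.zip_map, pv_zip_range_range,
    List.map_map]
  simp [Function.comp_def, Prod.map]

theorem pv_flatMap_if {α : Type} (l : List Int) (P : Int → Prop) [DecidablePred P] (g : Int → α) :
    l.flatMap (fun i => if P i then [g i] else []) = (l.filter (fun i => decide (P i))).map g := by
  induction l with
  | nil => simp
  | cons x t ih => by_cases h : P x <;> simp [h, ih]

theorem pv_filter_pyRange (a b lo hi : Int) :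
    (PySem.List.pyRange a b 1).filter (fun i => decide (lo ≤ i ∧ i < hi)) =
      PySem.List.pyRange (max a lo) (min b hi) 1 := by
  by_cases hab : b ≤ a
  · rw [PySem.List.pyRange_one_eq_nil hab, PySem.List.pyRange_one_eq_nil (by omega)]
    rfl
  · have hab' : a < b := by omega
    rw [PySem.List.pyRange_one_cons hab', List.filter_cons]
    by_cases h : lo ≤ a ∧ a < hi
    · have ih := pv_filter_pyRange (a+1) b lo hi
      simp only [h, decide_true, and_self, if_true]
      rw [ih]
      have h2 : max (a+1) lo = a + 1 := by omega
      rw [h2]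
      conv_rhs => rw [show max a lo = a by omega,
        PySem.List.pyRange_one_cons (show a < min b hi by omega)]
    · have ih := pv_filter_pyRange (a+1) b lo hi
      simp only [decide_eq_true_eq, h, if_false]
      rw [ih]
      rcases not_and_or.mp h with h' | h'
      · rw [show max (a+1) lo = max a lo by omega]
      · rw [PySem.List.pyRange_one_eq_nil (by omega), PySem.List.pyRange_one_eq_nil (by omega)]
  termination_by (b - a).toNat
  decreasing_by all_goals omega

theorem pv_filter_row {s j0 : Int} (N : Int) (key : Int → Int) (g : Int → Char)
    (hkey : ∀ j, (key j == s) = (j == j0)) :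
    ((PySem.List.pyRange 0 N 1).map (fun j => (key j, g j))).filter (fun p => p.1 == s) =
      if 0 ≤ j0 ∧ j0 < N then [(s, g j0)] else [] := by
  rw [List.filter_map]
  have hc : ((fun p : Int × Char => p.1 == s) ∘ fun j => (key j, g j)) = fun j => decide (j = j0) := by
    funext j
    simp only [Function.comp]
    rw [hkey j]
    rfl
  rw [hc, List.filter_eq]
  have hkj : key j0 = s := by have := hkey j0; simp at this; exact this
  by_cases h : 0 ≤ j0 ∧ j0 < N
  · have hmem : j0 ∈ PySem.List.pyRange 0 N 1 := by rw [PySem.List.mem_pyRange_one]; omega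
    rw [List.count_eq_one_of_mem (PySem.List.nodup_pyRange_one 0 N) hmem]
    simp [h, hkj]
  · have hmem : j0 ∉ PySem.List.pyRange 0 N 1 := by rw [PySem.List.mem_pyRange_one]; omega
    rw [List.count_eq_zero_of_not_mem hmem]
    simp [h]

theorem pv_outer_getD (rows : List Int) (d : PySem.Dict Int (List Char))
    (f : Int → Int → Int) (g : Int → Int → Char) (N s : Int) :
    (rows.foldl (fun d i => (PySem.List.pyRange 0 N 1).foldl
        (fun d j => d.modify (f i j) [] (fun b => b ++ [g i j])) d) d).getD s []
      = d.getD s [] ++ rows.flatMap (fun i =>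
          ((((PySem.List.pyRange 0 N 1).map (fun j => (f i j, g i j))).filter
            (fun p => p.1 == s)).map (·.2))) := by
  induction rows generalizing d with
  | nil => simp
  | cons i rest ih =>
    rw [List.foldl_cons, ih, List.flatMap_cons, ← List.append_assoc]
    congr 1
    have hfold : (PySem.List.pyRange 0 N 1).foldl
        (fun d j => d.modify (f i j) [] (fun b => b ++ [g i j])) d
      = ((PySem.List.pyRange 0 N 1).map (fun j => (f i j, g i j))).foldl
          (fun d p => d.modify p.1 [] (fun b => b ++ [p.2])) d := by
      rw [List.foldl_map]
    rw [hfold, PySem.Dict.getD_foldl_modify_append]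

theorem pv_bucket (M N s lo hi : Int) (f : Int → Int → Int) (j0 : Int → Int) (g : Int → Int → Char)
    (hkey : ∀ i j, (f i j == s) = (j == j0 i))
    (hcond : ∀ i, (0 ≤ j0 i ∧ j0 i < N) ↔ (lo ≤ i ∧ i < hi)) :
    ((PySem.List.pyRange 0 M 1).foldl (fun d i => (PySem.List.pyRange 0 N 1).foldl
        (fun d j => d.modify (f i j) [] (fun b => b ++ [g i j])) d) PySem.Dict.empty).getD s []
      = (PySem.List.pyRange (max 0 lo) (min M hi) 1).map (fun i => g i (j0 i)) := by
  rw [pv_outer_getD, PySem.Dict.getD_empty]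
  have h1 : ∀ i : Int, ((((PySem.List.pyRange 0 N 1).map (fun j => (f i j, g i j))).filter
      (fun p => p.1 == s)).map (·.2)) = if lo ≤ i ∧ i < hi then [g i (j0 i)] else [] := by
    intro i
    rw [pv_filter_row N (f i) (fun j => g i j) (hkey i)]
    by_cases h : 0 ≤ j0 i ∧ j0 i < N
    · rw [if_pos h, if_pos ((hcond i).mp h)]
      rfl
    · rw [if_neg h, if_neg (fun hh => h ((hcond i).mpr hh))]
      rfl
  simp only [h1]
  rw [pv_flatMap_if _ (fun i => lo ≤ i ∧ i < hi), pv_filter_pyRange]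
  simp

theorem pv_main_pos (M N : Int) (hM : 1 ≤ M) (hN : 0 ≤ N) (ch : Int → Int → Char) :
    (PySem.List.pyRange 0 N 1).map (fun n => String.ofList
        (((PySem.List.pyRange 0 M 1).zip (PySem.List.pyRange n (-1) (-1))).map (fun p => ch p.1 p.2)))
    ++ (PySem.List.pyRange 1 M 1).map (fun m => String.ofList
        (((PySem.List.pyRange m M 1).zip (PySem.List.pyRange (N-1) (-1) (-1))).map (fun p => ch p.1 p.2)))
    = (PySem.List.pyRange 0 (M+N-1) 1).map (fun k => String.ofList
        (((PySem.List.pyRange 0 M 1).foldl (fun d i => (PySem.List.pyRange 0 N 1).foldl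
          (fun d j => d.modify (i+j) [] (fun b => b ++ [ch i j])) d) PySem.Dict.empty).getD k [])) := by
  have hbucket : ∀ s : Int, ((PySem.List.pyRange 0 M 1).foldl (fun d i => (PySem.List.pyRange 0 N 1).foldl
          (fun d j => d.modify (i+j) [] (fun b => b ++ [ch i j])) d) PySem.Dict.empty).getD s []
      = (PySem.List.pyRange (max 0 (s-N+1)) (min M (s+1)) 1).map (fun i => ch i (s - i)) := by
    intro s
    exact pv_bucket M N s (s-N+1) (s+1) (fun i j => i + j) (fun i => s - i) ch
      (fun i j => by apply Bool.eq_iff_iff.mpr; simp only [beq_iff_eq]; omega)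
      (fun i => by dsimp only; omega)
  simp only [hbucket]
  rw [PySem.List.pyRange_one_append 0 N (M+N-1) hN (by omega), List.map_append]
  congr 1
  · apply List.map_congr_left
    intro n hn
    rw [PySem.List.mem_pyRange_one] at hn
    congr 1
    rw [pv_zip_up_down, List.map_map,
      show max 0 (n-N+1) = 0 by omega, PySem.List.pyRange_one,
      show ((min M (n+1)) - 0).toNat = min (M-0).toNat (n-(-1)).toNat by omega, List.map_map]
    apply List.map_congr_left
    intro k _
    simp only [Function.comp]
    rw [show n - (0 + (k:Int)) = n - k by ring]
  · rw [PySem.List.pyRange_one 1 M, PySem.List.pyRange_one N (M+N-1),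
      show (M + N - 1 - N).toNat = (M - 1).toNat by omega, List.map_map, List.map_map]
    apply List.map_congr_left
    intro k hk
    simp only [Function.comp]
    congr 1
    rw [pv_zip_up_down, List.map_map,
      show max 0 (N + (k:Int) - N + 1) = 1 + k by omega, PySem.List.pyRange_one,
      show (min M (N + (k:Int) + 1) - (1+(k:Int))).toNat = min (M - (1+(k:Int))).toNat ((N-1) - (-1)).toNat by omega,
      List.map_map]
    apply List.map_congr_left
    intro u _
    simp only [Function.comp]
    rw [show N + (k:Int) - (1 + (k:Int) + (u:Int)) = N - 1 - u by ring]


theorem pv_main_neg (M N : Int) (hM : 1 ≤ M) (hN : 0 ≤ N) (ch : Int → Int → Char) :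
    (PySem.List.pyRange 0 N 1).map (fun n => String.ofList
        (((PySem.List.pyRange 0 M 1).zip (PySem.List.pyRange n N 1)).map (fun p => ch p.1 p.2)))
    ++ (PySem.List.pyRange 1 M 1).map (fun m => String.ofList
        (((PySem.List.pyRange m M 1).zip (PySem.List.pyRange 0 N 1)).map (fun p => ch p.1 p.2)))
    = ((PySem.List.pyRange 0 (-N) (-1)) ++ PySem.List.pyRange 1 M 1).map (fun k => String.ofList
        (((PySem.List.pyRange 0 M 1).foldl (fun d i => (PySem.List.pyRange 0 N 1).foldl
          (fun d j => d.modify (i-j) [] (fun b => b ++ [ch i j])) d) PySem.Dict.empty).getD k [])) := by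
  have hbucket : ∀ s : Int, ((PySem.List.pyRange 0 M 1).foldl (fun d i => (PySem.List.pyRange 0 N 1).foldl
          (fun d j => d.modify (i-j) [] (fun b => b ++ [ch i j])) d) PySem.Dict.empty).getD s []
      = (PySem.List.pyRange (max 0 s) (min M (s+N)) 1).map (fun i => ch i (i - s)) := by
    intro s
    exact pv_bucket M N s s (s+N) (fun i j => i - j) (fun i => i - s) ch
      (fun i j => by apply Bool.eq_iff_iff.mpr; simp only [beq_iff_eq]; omega)
      (fun i => by dsimp only; omega)
  simp only [hbucket]
  rw [List.map_append]
  congr 1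
  · rw [PySem.List.pyRange_one 0 N, PySem.List.pyRange_neg_one 0 (-N),
      show (0 - -N).toNat = (N - 0).toNat by omega, List.map_map, List.map_map]
    apply List.map_congr_left
    intro k hk
    rw [List.mem_range] at hk
    simp only [Function.comp]
    congr 1
    rw [pv_zip_up_up, List.map_map,
      show max 0 (0 - (k:Int)) = 0 by omega, PySem.List.pyRange_one,
      show (min M (0 - (k:Int) + N) - 0).toNat = min (M - 0).toNat (N - (0 + (k:Int))).toNat by omega,
      List.map_map]
    apply List.map_congr_left
    intro u _
    simp only [Function.comp]
    rw [show (0:Int) + (u:Int) - (0 - (k:Int)) = 0 + k + u by ring]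
  · apply List.map_congr_left
    intro m hm
    rw [PySem.List.mem_pyRange_one] at hm
    congr 1
    rw [pv_zip_up_up, List.map_map,
      show max 0 m = m by omega, PySem.List.pyRange_one,
      show (min M (m + N) - m).toNat = min (M - m).toNat (N - 0).toNat by omega,
      List.map_map]
    apply List.map_congr_left
    intro u _
    simp only [Function.comp]
    rw [show m + (u:Int) - m = 0 + u by ring]

theorem pv_ab_eq (text_lines : List String) (positive : Bool) :
    diagonal_traverse text_lines positive = diagonal_traverse_alt text_lines positive := by
  cases positive with
  | true =>
    cases text_lines with
    | nil => rfl
    | cons t rest =>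
      simp only [diagonal_traverse, diagonal_traverse_alt, if_true]
      refine pv_main_pos (PySem.List.len (t :: rest)) (PySem.Str.len (PySem.List.pyGetD (t :: rest) 0 "")) ?_ ?_
        (fun i j => PySem.List.pyGetD (PySem.List.pyGetD (t :: rest) i "").toList j ' ')
      · rw [PySem.List.len_eq]; simp
      · rw [PySem.Str.len_eq]; positivity
  | false =>
    cases text_lines with
    | nil => rfl
    | cons t rest =>
      simp only [diagonal_traverse, diagonal_traverse_alt, Bool.false_eq_true, reduceIte]
      refine pv_main_neg (PySem.List.len (t :: rest)) (PySem.Str.len (PySem.List.pyGetD (t :: rest) 0 "")) ?_ ?_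
        (fun i j => PySem.List.pyGetD (PySem.List.pyGetD (t :: rest) i "").toList j ' ')
      · rw [PySem.List.len_eq]; simp
      · rw [PySem.Str.len_eq]; positivity

-- ===== VERDICT (by name: the statement is the Claim_ definition above) =====
theorem diagonal_traverse_spec : Claim_equal_diagonal_traverse := by
  intro tl pos _ _
  unfold Spec_diagonal_traverse
  exact pv_ab_eq tl pos
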